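-- pv_equiv track=rewrite | github.com/Sunho12/algorithm | 구현/백준17140.py | func_sort
-- ===== SOURCE A (Python) =====
-- from collections import Counter
--
-- def func_sort(lst):
--     lst = [x for x in lst if x != 0]
--     cnt = Counter(lst)
--     cnt_sorted = sorted(cnt.items(), key= lambda x: (x[1], x[0]))
--     answer = []
--     for i in range(len(cnt_sorted)):
--         answer.append(cnt_sorted[i][0])
--         answer.append(cnt_sorted[i][1])
--
--     if len(answer) > 100:
--         answer = answer[-100:]
--
--     return answer
-- ===== SOURCE B (Python) =====
-- def func_sort(lst):
--     cnt = {}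
--     for x in lst:
--         if x != 0:
--             cnt[x] = cnt.get(x, 0) + 1
--     keys = sorted(cnt)
--     answer = []
--     for c in sorted(set(cnt.values())):
--         for v in keys:
--             if cnt[v] == c:
--                 answer.append(v)
--                 answer.append(c)
--     return answer[-100:]
-- ===== Notes on version B (the rewrite author's own statement) =====
-- stated objective: alternative
-- what changed: no (value,count) pair list and no comparison sort of pairs: B counts with a plain dict loop, then produces the answer by enumerating the distinct counts in increasing order and, for each count, scanning the sorted keys and appending the values with that count
import Mathlib
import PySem

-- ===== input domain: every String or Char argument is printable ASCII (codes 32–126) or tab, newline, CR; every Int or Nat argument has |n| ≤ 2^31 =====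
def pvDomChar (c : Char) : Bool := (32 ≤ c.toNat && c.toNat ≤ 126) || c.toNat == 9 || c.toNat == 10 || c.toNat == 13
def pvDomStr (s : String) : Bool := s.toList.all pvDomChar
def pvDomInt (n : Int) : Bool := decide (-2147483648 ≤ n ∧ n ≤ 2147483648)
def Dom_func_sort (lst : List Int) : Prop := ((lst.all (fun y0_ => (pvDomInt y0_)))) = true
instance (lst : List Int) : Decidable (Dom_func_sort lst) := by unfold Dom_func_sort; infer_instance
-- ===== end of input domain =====

-- B drops the (value,count) pair list and its comparison sort: it counts with a plain dict loop, then
-- enumerates the distinct counts in increasing order and scans the sorted keys per count (alternative).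

-- ===== PORT A =====
def func_sort (lst : List Int) : List Int :=
  let lst1 := lst.filter (fun x => decide (x ≠ 0))
  let cnt := PySem.Dict.counter lst1
  let cnt_sorted := PySem.List.sorted2 cnt.items (fun x => x.2) (fun x => x.1)
  let answer := (PySem.List.pyRange 0 (PySem.List.len cnt_sorted)).foldl
    (fun acc i =>
      (acc ++ [(PySem.List.pyGetD cnt_sorted i (0, 0)).1]) ++ [(PySem.List.pyGetD cnt_sorted i (0, 0)).2]) []
  if answer.length > 100 then PySem.List.slice answer (some (-100)) none else answer

-- ===== PORT B =====
def func_sort_alt (lst : List Int) : List Int :=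
  let cnt := lst.foldl (fun d x => if x ≠ 0 then d.insert x (d.getD x 0 + 1) else d) PySem.Dict.empty
  let keys := PySem.List.sorted cnt.keys (fun v => v)
  let answer := (PySem.List.sorted (PySem.Set.ofList cnt.values) (fun c => c)).foldl
    (fun acc c => keys.foldl
      -- cnt[v]: v ranges over cnt's keys, so the Python lookup never raises; getD is exact here
      (fun acc v => if cnt.getD v 0 = c then (acc ++ [v]) ++ [c] else acc) acc) []
  PySem.List.slice answer (some (-100)) none

-- ===== PRECONDITION & SPEC =====
def Spec_func_sort (lst : List Int) (out : List Int) : Prop := out = func_sort_alt lst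
instance (lst : List Int) (out : List Int) : Decidable (Spec_func_sort lst out) := by unfold Spec_func_sort; infer_instance

-- ===== CLAIM (what is proved, stated in full; the proofs are below) =====
def Claim_equal_func_sort : Prop := ∀ (lst : List Int), Dom_func_sort lst → Spec_func_sort lst (func_sort lst)

-- ===== LEMMAS AND PROOFS =====

-- sorting by the tuple key (x[1], x[0]) is sorting by the lexicographic key toLex (x.2, x.1)
lemma sorted2_eq_sorted_toLex (xs : List (Int × Int)) :
    PySem.List.sorted2 xs (fun p => p.2) (fun p => p.1) =
      PySem.List.sorted xs (fun p => toLex (p.2, p.1)) := by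
  have hb : (fun (a b : Int × Int) => (decide (a.2 < b.2) || !decide (b.2 < a.2) && decide (a.1 < b.1)))
      = fun (a b : Int × Int) => decide ((toLex (a.2, a.1) : Lex (Int × Int)) < toLex (b.2, b.1)) := by
    funext a b
    rcases lt_trichotomy a.2 b.2 with h | h | h <;>
      simp [Prod.Lex.lt_iff, h, not_lt.mpr h.le] <;> omega
  rw [PySem.List.sorted_eq_foldl_insertBy]
  show xs.foldl (fun acc x => PySem.List.insertBy
      (fun a b => decide (a.2 < b.2) || !decide (b.2 < a.2) && decide (a.1 < b.1)) x acc) [] = _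
  rw [hb]

-- partitioning ks by a key g over a duplicate-free list of key values covering ks is a rearrangement of ks
lemma flatMap_filter_perm (g : Int → Int) :
    ∀ (cs ks : List Int), cs.Nodup → (∀ v ∈ ks, g v ∈ cs) →
      (cs.flatMap (fun c => ks.filter (fun v => decide (g v = c)))).Perm ks := by
  intro cs
  induction cs with
  | nil =>
    intro ks _ hcov
    have : ks = [] := List.eq_nil_iff_forall_not_mem.mpr (fun v hv => by simpa using hcov v hv)
    simp [this]
  | cons c cs ih =>
    intro ks hnd hcov
    rw [List.flatMap_cons]
    have hmaps : cs.flatMap (fun c' => ks.filter (fun v => decide (g v = c')))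
        = cs.flatMap (fun c' => (ks.filter (fun v => !decide (g v = c))).filter (fun v => decide (g v = c'))) := by
      apply List.flatMap_congr
      intro c' hc'
      rw [List.filter_filter]
      apply List.filter_congr
      intro v _
      have : c' ≠ c := fun h => (List.nodup_cons.mp hnd).1 (h ▸ hc')
      by_cases h : g v = c' <;> simp [h, this]
    rw [hmaps]
    have ihp := ih (ks.filter (fun v => !decide (g v = c))) (List.nodup_cons.mp hnd).2 (by
      intro v hv
      rcases List.mem_filter.mp hv with ⟨hvk, hne⟩
      rcases List.mem_cons.mp (hcov v hvk) with h | h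
      · simp [h] at hne
      · exact h)
    exact (List.Perm.append_left _ ihp).trans (List.filter_append_perm _ ks)

lemma flatMap_ite_eq_filter_flatMap (p : Int → Bool) (g : Int → List Int) (l : List Int) :
    l.flatMap (fun v => if p v then g v else []) = (l.filter p).flatMap g := by
  induction l with
  | nil => rfl
  | cons x t ih => by_cases h : p x <;> simp [h, ih]

-- the flattened pair loop of B, block by block
lemma pairwise_lt_flatMap_blocks (counts keys : List Int) (g : Int → Int)
    (hc : counts.Pairwise (· < ·)) (hk : keys.Pairwise (· < ·)) :
    (counts.flatMap (fun c => (keys.filter (fun v => decide (g v = c))).map (fun v => (v, c)))).Pairwise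
      (fun a b : Int × Int => (toLex (a.2, a.1) : Lex (Int × Int)) < toLex (b.2, b.1)) := by
  rw [List.flatMap_def, List.pairwise_flatten]
  constructor
  · intro s hs
    rcases List.mem_map.mp hs with ⟨c, _, rfl⟩
    rw [List.pairwise_map]
    exact (hk.filter _).imp (fun hab => Prod.Lex.right _ hab)
  · rw [List.pairwise_map]
    apply hc.imp
    intro c₁ c₂ h12 p hp q hq
    rcases List.mem_map.mp hp with ⟨v, _, rfl⟩
    rcases List.mem_map.mp hq with ⟨w, _, rfl⟩
    exact Prod.Lex.left _ _ h12

-- ===== VERDICT (by name: the statement is the Claim_ definition above) =====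
theorem func_sort_spec : Claim_equal_func_sort := by
  intro lst _
  unfold Spec_func_sort
  simp only [func_sort, func_sort_alt]
  set f := lst.filter (fun x => decide (x ≠ 0)) with hf
  -- B's counting loop builds Counter(f)
  have hcnt : lst.foldl (fun d x => if x ≠ 0 then d.insert x (d.getD x 0 + 1) else d)
      (PySem.Dict.empty : PySem.Dict Int Int) = PySem.Dict.counter f := by
    rw [← PySem.Dict.foldl_insert_getD_add_one_eq_counter, hf, List.foldl_filter]
    simp only [decide_eq_true_eq]
  rw [hcnt]
  set cnt := PySem.Dict.counter f with hcntdef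
  set g : Int → Int := fun v => f.count v with hg
  set keys := PySem.List.sorted cnt.keys (fun v => v) with hkeys
  set counts := PySem.List.sorted (PySem.Set.ofList cnt.values) (fun c => c) with hcounts
  have hgetD : ∀ v, cnt.getD v 0 = g v := fun v => PySem.Dict.getD_counter f v
  -- B's nested loop flattens the block-structured pair list
  set pairs := counts.flatMap
    (fun c => (keys.filter (fun v => decide (g v = c))).map (fun v => (v, c))) with hpairs
  have hB : counts.foldl
      (fun acc c => keys.foldl
        (fun acc v => if cnt.getD v 0 = c then (acc ++ [v]) ++ [c] else acc) acc) []
      = pairs.flatMap (fun p => [p.1, p.2]) := by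
    have hinner : ∀ (c : Int) (acc : List Int),
        keys.foldl (fun acc v => if cnt.getD v 0 = c then (acc ++ [v]) ++ [c] else acc) acc
        = acc ++ (keys.filter (fun v => decide (g v = c))).flatMap (fun v => [v, c]) := by
      intro c acc
      have hfun : (fun (acc : List Int) v => if cnt.getD v 0 = c then (acc ++ [v]) ++ [c] else acc)
          = fun acc v => acc ++ (if decide (g v = c) then [v, c] else []) := by
        funext acc v
        by_cases h : g v = c <;> simp [hgetD v, h]
      rw [hfun, PySem.List.foldl_append_eq_flatMap, flatMap_ite_eq_filter_flatMap]
    have houter : (fun (acc : List Int) c => keys.foldl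
          (fun acc v => if cnt.getD v 0 = c then (acc ++ [v]) ++ [c] else acc) acc)
        = fun acc c => acc ++ (keys.filter (fun v => decide (g v = c))).flatMap (fun v => [v, c]) := by
      funext acc c; exact hinner c acc
    rw [houter, PySem.List.foldl_append_eq_flatMap, List.nil_append, hpairs, List.flatMap_assoc]
    apply List.flatMap_congr
    intro c _
    rw [List.flatMap_map]
  rw [hB]
  -- the block-structured pair list IS sorted(cnt.items(), key=(count, value))
  have hkeyseq : keys = PySem.List.sorted (PySem.Set.ofList f) (fun v => v) := by
    rw [hkeys, hcntdef, PySem.Dict.keys_counter]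
  have hpairssorted : PySem.List.sorted2 cnt.items (fun x => x.2) (fun x => x.1) = pairs := by
    rw [sorted2_eq_sorted_toLex]
    apply PySem.List.sorted_eq_of_perm_of_pairwise_lt
    · -- pairs.Perm cnt.items
      have hmapform : pairs = (counts.flatMap
          (fun c => keys.filter (fun v => decide (g v = c)))).map (fun v => (v, g v)) := by
        rw [hpairs, List.map_flatMap]
        apply List.flatMap_congr
        intro c _
        apply List.map_congr_left
        intro v hv
        have := of_decide_eq_true (List.mem_filter.mp hv).2
        rw [this]
      rw [hmapform]
      have hLperm : (counts.flatMap (fun c => keys.filter (fun v => decide (g v = c)))).Perm keys := by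
        apply flatMap_filter_perm
        · exact ((PySem.List.sorted_perm _ _ _).symm).nodup (PySem.Set.nodup_ofList _)
        · intro v hv
          rw [hcounts, PySem.List.mem_sorted, PySem.Set.mem_ofList]
          have hvk : v ∈ cnt.keys := (PySem.List.mem_sorted _ _ _ _).mp (hkeys ▸ hv)
          have : (v, g v) ∈ cnt.items := by
            rw [hcntdef, PySem.Dict.items_counter]
            rw [hcntdef, PySem.Dict.keys_counter] at hvk
            exact List.mem_map.mpr ⟨v, hvk, rfl⟩
          have : g v ∈ cnt.values := by
            simp only [PySem.Dict.values]
            exact List.mem_map.mpr ⟨(v, g v), this, rfl⟩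
          exact this
      have hkeysperm : keys.Perm (PySem.Set.ofList f) := by
        rw [hkeyseq]; exact PySem.List.sorted_perm _ _ _
      have : ((counts.flatMap (fun c => keys.filter (fun v => decide (g v = c)))).map
          (fun v => (v, g v))).Perm ((PySem.Set.ofList f).map (fun v => (v, g v))) :=
        (hLperm.trans hkeysperm).map _
      rw [hcntdef, PySem.Dict.items_counter]
      exact this
    · -- pairs is strictly increasing under the lexicographic (count, value) key
      rw [hpairs]
      apply pairwise_lt_flatMap_blocks
      · rw [hcounts]; exact PySem.List.sorted_ofList_pairwise_lt _
      · rw [hkeyseq]; exact PySem.List.sorted_ofList_pairwise_lt _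
  rw [hpairssorted]
  -- A's index loop flattens the same pair list
  have hA : (PySem.List.pyRange 0 (PySem.List.len pairs)).foldl
      (fun acc i =>
        (acc ++ [(PySem.List.pyGetD pairs i (0, 0)).1]) ++ [(PySem.List.pyGetD pairs i (0, 0)).2]) []
      = pairs.flatMap (fun p => [p.1, p.2]) := by
    have hfun : (fun (acc : List Int) i =>
        (acc ++ [(PySem.List.pyGetD pairs i (0, 0)).1]) ++ [(PySem.List.pyGetD pairs i (0, 0)).2])
        = fun acc i => acc ++ ((fun p : Int × Int => [p.1, p.2]) (PySem.List.pyGetD pairs i (0, 0))) := by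
      funext acc i; simp
    rw [hfun, PySem.List.foldl_append_eq_flatMap, List.nil_append,
      ← List.flatMap_map (fun j => PySem.List.pyGetD pairs j (0, 0)) (fun p : Int × Int => [p.1, p.2]),
      PySem.List.map_pyGetD_pyRange_zero pairs (0, 0)]
  rw [hA]
  set ans := pairs.flatMap (fun p => [p.1, p.2]) with hans
  by_cases hlen : ans.length > 100
  · simp [hlen]
  · simp only [hlen, if_false]
    rw [PySem.List.slice_from_neg_ofNat ans 100 (by omega)]
    have : ans.length - 100 = 0 := by omega
    rw [this, List.drop_zero]
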